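-- pv_equiv track=rewrite | github.com/gnekt/ModelAndLanguagesForBioInformatics | Python/Matrix/2.py | check_null_vector
-- ===== SOURCE A (Python) =====
-- def check_null_vector(matrix):
--     _shallow_matrix = matrix
--     i=0
--     for row in matrix:
--         j=i+1
--         while j < len(matrix):
--             if sum(row) + sum(matrix[j]) == 0: return True
--             j+=1
--         i+=1
--     return False
-- ===== SOURCE B (Python) =====
-- def check_null_vector(matrix):
--     seen = set()
--     for row in matrix:
--         s = sum(row)
--         if -s in seen:
--             return True
--         seen.add(s)
--     return False
-- ===== Notes on version B (the rewrite author's own statement) =====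
-- stated objective: faster
-- what changed: Replaces the O(n^2) all-pairs scan (recomputing row sums in the inner loop) with a single pass that hashes each row sum and checks whether its negation was seen before.
import Mathlib
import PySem

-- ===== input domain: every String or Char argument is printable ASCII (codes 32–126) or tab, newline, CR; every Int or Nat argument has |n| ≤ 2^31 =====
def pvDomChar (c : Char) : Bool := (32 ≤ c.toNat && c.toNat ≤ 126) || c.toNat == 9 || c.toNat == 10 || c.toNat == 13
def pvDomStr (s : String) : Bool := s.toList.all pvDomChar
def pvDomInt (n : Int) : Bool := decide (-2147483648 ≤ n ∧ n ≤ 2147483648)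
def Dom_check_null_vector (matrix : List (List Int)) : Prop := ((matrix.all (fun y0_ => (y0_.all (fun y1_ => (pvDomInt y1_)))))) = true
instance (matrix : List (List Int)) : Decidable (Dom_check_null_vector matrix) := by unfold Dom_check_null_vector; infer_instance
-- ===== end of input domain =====

-- B replaces A's all-pairs nested scan with a single pass over the rows keeping a set
-- of row sums already seen (objective: faster, asymptotic).

-- ===== PORT A =====
-- inner while loop: 'while j < len(matrix): if sum(row) + sum(matrix[j]) == 0: return True; j += 1'
def cnvInner (matrix : List (List Int)) (row : List Int) (j : Nat) : Bool :=
  if _h : j < matrix.length then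
    if row.sum + (matrix.getD j []).sum == 0 then true
    else cnvInner matrix row (j + 1)
  else false
termination_by matrix.length - j

-- outer for loop: 'for row in matrix: j = i+1; <inner>; i += 1'
def cnvOuter (matrix : List (List Int)) : List (List Int) → Nat → Bool
  | [], _ => false
  | row :: rest, i => if cnvInner matrix row (i + 1) then true else cnvOuter matrix rest (i + 1)

def check_null_vector (matrix : List (List Int)) : Bool :=
  cnvOuter matrix matrix 0

-- ===== PORT B =====
-- 'for row in matrix: s = sum(row); if -s in seen: return True; seen.add(s)'
def cnvScan : List (List Int) → PySem.Set Int → Bool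
  | [], _ => false
  | row :: rest, seen =>
    let s := row.sum
    if PySem.Set.contains seen (-s) then true
    else cnvScan rest (PySem.Set.add seen s)

def check_null_vector_alt (matrix : List (List Int)) : Bool :=
  cnvScan matrix PySem.Set.empty

-- ===== PRECONDITION & SPEC =====
def Spec_check_null_vector (matrix : List (List Int)) (out : Bool) : Prop := out = check_null_vector_alt matrix
instance (matrix : List (List Int)) (out : Bool) : Decidable (Spec_check_null_vector matrix out) := by unfold Spec_check_null_vector; infer_instance

-- ===== CLAIM (what is proved, stated in full; the proofs are below) =====
def Claim_equal_check_null_vector : Prop := ∀ (matrix : List (List Int)), Dom_check_null_vector matrix → Spec_check_null_vector matrix (check_null_vector matrix)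

-- ===== LEMMAS AND PROOFS =====

lemma cnvInner_iff (matrix : List (List Int)) (row : List Int) (j : Nat) :
    cnvInner matrix row j = true ↔
      ∃ k, j ≤ k ∧ k < matrix.length ∧ row.sum + (matrix.getD k []).sum = 0 := by
  induction j using cnvInner.induct matrix row with
  | case1 j h hs =>
    rw [cnvInner, dif_pos h, if_pos hs]
    exact ⟨fun _ => ⟨j, le_refl _, h, by simpa using hs⟩, fun _ => rfl⟩
  | case2 j h hs ih =>
    rw [cnvInner, dif_pos h, if_neg hs, ih]
    constructor
    · rintro ⟨k, hk1, hk2, hk3⟩; exact ⟨k, by omega, hk2, hk3⟩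
    · rintro ⟨k, hk1, hk2, hk3⟩
      refine ⟨k, ?_, hk2, hk3⟩
      rcases Nat.eq_or_lt_of_le hk1 with rfl | h'
      · exact absurd (by simp only [beq_iff_eq]; exact hk3) hs
      · omega
  | case3 j h =>
    rw [cnvInner, dif_neg h]
    simp only [Bool.false_eq_true, false_iff]
    rintro ⟨k, hk1, hk2, _⟩; omega

lemma cnvOuter_iff (matrix : List (List Int)) :
    ∀ (rows : List (List Int)) (i : Nat), rows = matrix.drop i →
      (cnvOuter matrix rows i = true ↔
        ∃ a b, i ≤ a ∧ a < b ∧ b < matrix.length ∧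
          (matrix.getD a []).sum + (matrix.getD b []).sum = 0) := by
  intro rows
  induction rows with
  | nil =>
    intro i hdrop
    have hlen : matrix.length ≤ i := by
      by_contra h
      have := List.drop_eq_getElem_cons (l := matrix) (by omega : i < matrix.length)
      rw [this] at hdrop; exact (List.cons_ne_nil _ _ hdrop.symm)
    simp only [cnvOuter, Bool.false_eq_true, false_iff]
    rintro ⟨a, b, h1, h2, h3, _⟩; omega
  | cons row rest ih =>
    intro i hdrop
    have hi : i < matrix.length := by
      by_contra h
      rw [List.drop_eq_nil_of_le (by omega)] at hdrop
      exact (List.cons_ne_nil _ _ hdrop)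
    have hcons := List.drop_eq_getElem_cons (l := matrix) hi
    rw [hcons] at hdrop
    have hrow : row = matrix[i] := (List.cons.injEq _ _ _ _ ▸ hdrop).1
    have hrest : rest = matrix.drop (i + 1) := (List.cons.injEq _ _ _ _ ▸ hdrop).2
    simp only [cnvOuter]
    split_ifs with hin
    · simp only [true_iff]
      rw [cnvInner_iff] at hin
      obtain ⟨k, hk1, hk2, hk3⟩ := hin
      refine ⟨i, k, le_refl _, by omega, hk2, ?_⟩
      rw [List.getD_eq_getElem _ _ hi, ← hrow]; exact hk3
    · rw [ih (i + 1) hrest]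
      constructor
      · rintro ⟨a, b, h1, h2, h3, h4⟩; exact ⟨a, b, by omega, h2, h3, h4⟩
      · rintro ⟨a, b, h1, h2, h3, h4⟩
        rcases Nat.eq_or_lt_of_le h1 with rfl | h'
        · exfalso; apply hin
          rw [cnvInner_iff]
          exact ⟨b, by omega, h3, by rw [hrow, ← List.getD_eq_getElem matrix [] hi]; exact h4⟩
        · exact ⟨a, b, by omega, h2, h3, h4⟩

lemma cnvScan_iff (rows : List (List Int)) :
    ∀ (seen : PySem.Set Int),
    cnvScan rows seen = true ↔
      ∃ b, b < rows.length ∧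
        (-((rows.getD b []).sum) ∈ seen ∨
          ∃ a, a < b ∧ (rows.getD a []).sum + (rows.getD b []).sum = 0) := by
  induction rows with
  | nil => intro seen; simp [cnvScan]
  | cons row rest ih =>
    intro seen
    simp only [cnvScan]
    split_ifs with hin
    · simp only [true_iff]
      refine ⟨0, by simp, Or.inl ?_⟩
      simpa using (PySem.Set.contains_iff _ _).mp hin
    · rw [ih]
      constructor
      · rintro ⟨b, hb, h⟩
        refine ⟨b + 1, by simpa using Nat.succ_lt_succ hb, ?_⟩
        rcases h with h | ⟨a, ha, hsum⟩
        · rw [PySem.Set.mem_add] at h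
          rcases h with h | h
          · exact Or.inl (by simpa using h)
          · refine Or.inr ⟨0, by omega, ?_⟩
            simp only [List.getD_cons_zero, List.getD_cons_succ]
            omega
        · exact Or.inr ⟨a + 1, by omega, by simpa using hsum⟩
      · rintro ⟨b, hb, h⟩
        match b, hb with
        | 0, _ =>
          rcases h with h | ⟨a, ha, _⟩
          · exact absurd ((PySem.Set.contains_iff _ _).mpr (by simpa using h)) hin
          · omega
        | b + 1, hb =>
          refine ⟨b, by simpa using Nat.lt_of_succ_lt_succ hb, ?_⟩
          rcases h with h | ⟨a, ha, hsum⟩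
          · refine Or.inl ?_
            rw [PySem.Set.mem_add]
            exact Or.inl (by simpa using h)
          · match a, ha with
            | 0, _ =>
              refine Or.inl ?_
              rw [PySem.Set.mem_add]
              refine Or.inr ?_
              simp only [List.getD_cons_zero, List.getD_cons_succ] at hsum
              omega
            | a + 1, ha =>
              exact Or.inr ⟨a, by omega, by simpa using hsum⟩

-- ===== VERDICT (by name: the statement is the Claim_ definition above) =====
theorem check_null_vector_spec : Claim_equal_check_null_vector := by
  intro matrix _
  unfold Spec_check_null_vector check_null_vector check_null_vector_alt
  apply Bool.eq_iff_iff.mpr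
  rw [cnvOuter_iff matrix matrix 0 (by simp), cnvScan_iff]
  constructor
  · rintro ⟨a, b, _, hab, hb, hsum⟩
    exact ⟨b, hb, Or.inr ⟨a, hab, hsum⟩⟩
  · rintro ⟨b, hb, h⟩
    rcases h with h | ⟨a, hab, hsum⟩
    · simp [PySem.Set.empty] at h
    · exact ⟨a, b, Nat.zero_le _, hab, hb, hsum⟩
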